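-- pv_equiv track=rewrite | github.com/AI-STACK-dev/Algorithm_solving | sujang/programmers/표편집.py | solution
-- ===== SOURCE A (Python) =====
-- def solution(n, k, cmd):
--     ans = ["O"]*n
--     stack = []
--     # define linked list
--     linkedList = {}
--     for i in range(n):
--         linkedList[i] = [i-1,i+1]
--     linkedList[0] = [None, 1]
--     linkedList[n-1] = [n-2,None]
--     # cmd
--     for c in cmd:
--         cs = c.split()
--         # delete
--         if cs[0] == "C":
--             ans[k] = "X"
--             stack.append(k)
--             prev, nex = linkedList[k]
--             if prev != None:
--                 linkedList[prev][1] = nex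
--             if nex != None:
--                 linkedList[nex][0] = prev
--                 k = nex
--             else:
--                 k = prev
--         # undo
--         elif cs[0] == "Z":
--             idx = stack.pop()
--             ans[idx] = "O"
--             prev,nex = linkedList[idx]
--             if prev != None:
--                 linkedList[prev][1] = idx
--             if nex != None:
--                 linkedList[nex][0] = idx
--         # move
--         else:
--             amt = int(cs[1])
--             if cs[0] == "U":
--                 param = 0
--             else:
--                 param = 1
--             for _ in range(amt):
--                 k = linkedList[k][param]
--     return "".join(ans)
-- ===== SOURCE B (Python) =====
-- def up(ans, n, j):
--     while j < n and ans[j] == "X":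
--         j += 1
--     return j
--
-- def down(ans, j):
--     while j >= 0 and ans[j] == "X":
--         j -= 1
--     return j
--
-- def solution(n, k, cmd):
--     ans = ["O"] * n
--     stack = []
--     for c in cmd:
--         cs = c.split()
--         if cs[0] == "C":
--             ans[k] = "X"
--             stack.append(k)
--             j = up(ans, n, k + 1)
--             k = j if j < n else down(ans, k - 1)
--         elif cs[0] == "Z":
--             ans[stack.pop()] = "O"
--         elif cs[0] == "U":
--             for _ in range(int(cs[1])):
--                 k = down(ans, k - 1)
--         else:
--             for _ in range(int(cs[1])):
--                 k = up(ans, n, k + 1)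
--     return "".join(ans)
-- ===== Notes on version B (the rewrite author's own statement) =====
-- stated objective: simpler
-- what changed: B drops A's dict-based doubly linked list (built up front and spliced/unspliced on every delete/undo) and drives everything from the status array alone: delete repositions the cursor by scanning for the next/previous 'O' row, undo just flips the popped row back, and moves step by skip-scanning dead rows.
-- outside the precondition, e.g. on solution(0, 0, ['D 1']): A returns '', B returns ''
import Mathlib
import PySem

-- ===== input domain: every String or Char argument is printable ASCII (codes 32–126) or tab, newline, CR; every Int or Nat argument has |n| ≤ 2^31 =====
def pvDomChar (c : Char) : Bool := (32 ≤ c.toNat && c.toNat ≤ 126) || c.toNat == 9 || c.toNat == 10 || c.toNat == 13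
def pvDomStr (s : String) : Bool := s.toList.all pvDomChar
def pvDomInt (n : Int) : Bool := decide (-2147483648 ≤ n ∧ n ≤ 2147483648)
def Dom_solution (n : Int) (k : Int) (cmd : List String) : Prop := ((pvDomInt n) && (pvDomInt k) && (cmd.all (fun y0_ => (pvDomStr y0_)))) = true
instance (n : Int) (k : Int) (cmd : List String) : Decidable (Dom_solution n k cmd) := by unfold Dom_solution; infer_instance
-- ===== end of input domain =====

-- B replaces A's dict-based doubly linked list by plain scans over the status array ("simpler"; return value only).


-- ===== PORT A =====
-- state of A's loop: ans, stack, the linked-list dict, and the cursor k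
-- (k is Option Int because A assigns k = prev/nex which can be Python None)
structure StA where
  ans : List String
  stack : List Int
  ll : PySem.Dict Int (Option Int × Option Int)
  k : Option Int

-- linkedList = {i: [i-1, i+1] for i in range(n)}; linkedList[0] = [None, 1]; linkedList[n-1] = [n-2, None]
def initLL (n : Int) : PySem.Dict Int (Option Int × Option Int) :=
  (((PySem.List.pyRange 0 n 1).foldl
      (fun d i => d.insert i (some (i - 1), some (i + 1))) PySem.Dict.empty).insert
    0 (none, some 1)).insert (n - 1) (some (n - 2), none)

-- one iteration of A's `for c in cmd` loop (where Python raises — empty command, k = None,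
-- pop from empty stack, int() failure — the port returns the state unchanged; Pre_ excludes those)
def stepA (s : StA) (c : String) : StA :=
  match PySem.Str.split₀ c with
  | [] => s
  | c0 :: rest =>
    if c0 = "C" then
      match s.k with
      | none => s
      | some k0 =>
        let ans := PySem.List.pySetD s.ans k0 "X"
        let stack := s.stack ++ [k0]
        let pn := s.ll.getD k0 (none, none)
        let ll1 := match pn.1 with
          | some p => s.ll.modify p (none, none) (fun v => (v.1, pn.2))
          | none => s.ll
        match pn.2 with
        | some x => ⟨ans, stack, ll1.modify x (none, none) (fun v => (pn.1, v.2)), some x⟩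
        | none => ⟨ans, stack, ll1, pn.1⟩
    else if c0 = "Z" then
      match s.stack.getLast? with
      | none => s
      | some idx =>
        let stack := s.stack.dropLast
        let ans := PySem.List.pySetD s.ans idx "O"
        let pn := s.ll.getD idx (none, none)
        let ll1 := match pn.1 with
          | some p => s.ll.modify p (none, none) (fun v => (v.1, some idx))
          | none => s.ll
        let ll2 := match pn.2 with
          | some x => ll1.modify x (none, none) (fun v => (some idx, v.2))
          | none => ll1
        ⟨ans, stack, ll2, s.k⟩
    else
      match rest with
      | [] => s
      | c1 :: _ =>
        match PySem.Int.ofStr? c1 with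
        | none => s
        | some amt =>
          -- for _ in range(amt): k = linkedList[k][param]  (range(amt) has amt.toNat elements)
          ⟨s.ans, s.stack, s.ll,
            (List.range amt.toNat).foldl (fun kk _ =>
              match kk with
              | some k0 => if c0 = "U" then (s.ll.getD k0 (none, none)).1
                           else (s.ll.getD k0 (none, none)).2
              | none => none) s.k⟩

def solution (n : Int) (k : Int) (cmd : List String) : String :=
  -- ans = ["O"]*n (empty for n ≤ 0, as in Python)
  PySem.Str.join ""
    (cmd.foldl stepA ⟨List.replicate n.toNat "O", [], initLL n, some k⟩).ans

-- ===== PORT B =====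
-- def up(ans, n, j): while j < n and ans[j] == "X": j += 1; return j
def upScan (ans : List String) (n j : Int) : Int :=
  if j < n ∧ PySem.List.pyGet? ans j = some "X" then upScan ans n (j + 1) else j
termination_by (n - j).toNat
decreasing_by omega

-- def down(ans, j): while j >= 0 and ans[j] == "X": j -= 1; return j
def downScan (ans : List String) (j : Int) : Int :=
  if 0 ≤ j ∧ PySem.List.pyGet? ans j = some "X" then downScan ans (j - 1) else j
termination_by (j + 1).toNat
decreasing_by omega

structure StB where
  ans : List String
  stack : List Int
  k : Int

-- one iteration of B's loop
def stepB (n : Int) (s : StB) (c : String) : StB :=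
  match PySem.Str.split₀ c with
  | [] => s
  | c0 :: rest =>
    if c0 = "C" then
      let ans := PySem.List.pySetD s.ans s.k "X"
      let stack := s.stack ++ [s.k]
      let j := upScan ans n (s.k + 1)
      ⟨ans, stack, if j < n then j else downScan ans (s.k - 1)⟩
    else if c0 = "Z" then
      match s.stack.getLast? with
      | none => s
      | some idx => ⟨PySem.List.pySetD s.ans idx "O", s.stack.dropLast, s.k⟩
    else
      match rest with
      | [] => s
      | c1 :: _ =>
        match PySem.Int.ofStr? c1 with
        | none => s
        | some amt =>
          if c0 = "U" then
            ⟨s.ans, s.stack, (List.range amt.toNat).foldl (fun kk _ => downScan s.ans (kk - 1)) s.k⟩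
          else
            ⟨s.ans, s.stack, (List.range amt.toNat).foldl (fun kk _ => upScan s.ans n (kk + 1)) s.k⟩

def solution_alt (n : Int) (k : Int) (cmd : List String) : String :=
  PySem.Str.join ""
    (cmd.foldl (stepB n) ⟨List.replicate n.toNat "O", [], k⟩).ans

-- ===== PRECONDITION & SPEC =====
-- first existing row at index ≥ j (D = currently deleted rows), and last existing row at index ≤ j
def nxtS (n : Int) (D : List Int) (j : Int) : Option Int :=
  if j < n then (if j ∈ D then nxtS n D (j + 1) else some j) else none
termination_by (n - j).toNat
decreasing_by omega

def prvS (D : List Int) (j : Int) : Option Int :=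
  if 0 ≤ j then (if j ∈ D then prvS D (j - 1) else some j) else none
termination_by (j + 1).toNat
decreasing_by omega

-- a cursor move of `m` steps is valid iff every step starts on an existing row
def moveSim (n : Int) (D : List Int) (isU : Bool) : Option Int → Nat → Option (Option Int)
  | ks, 0 => some ks
  | some j, m + 1 =>
    if 0 ≤ j ∧ j < n then
      moveSim n D isU (if isU then prvS D (j - 1) else nxtS n D (j + 1)) m
    else none
  | none, _ + 1 => none

-- validity of one command, over the abstract state (deleted-rows stack, cursor):
-- "C" needs a live in-range cursor (and n ≥ 2: A's 1-row table is unusable), "Z" a nonempty stack,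
-- a move a second integer token and a valid path; anything else is exactly where A raises.
def simStep (n : Int) (st : Option (List Int × Option Int)) (c : String) :
    Option (List Int × Option Int) :=
  match st with
  | none => none
  | some (D, ks) =>
    match PySem.Str.split₀ c with
    | [] => none
    | c0 :: rest =>
      if c0 = "C" then
        match ks with
        | some j =>
          if 2 ≤ n ∧ 0 ≤ j ∧ j < n ∧ j ∉ D then
            some (D ++ [j], ((nxtS n (D ++ [j]) (j + 1)).orElse (fun _ => prvS (D ++ [j]) (j - 1))))
          else none
        | none => none
      else if c0 = "Z" then
        if D = [] then none else some (D.dropLast, ks)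
      else
        match rest with
        | [] => none
        | c1 :: _ =>
          match PySem.Int.ofStr? c1 with
          | none => none
          | some amt => (moveSim n D (c0 == "U") ks amt.toNat).map (fun ks' => (D, ks'))

-- Pre_ = the original problem's guarantee on the command sequence, checked over the abstract
-- (deleted-rows stack, cursor) state only — no status array, no linked list, no output: each "C"
-- finds the cursor on an existing row (and n ≥ 2: A's 1-row linked list is corrupt and raises),
-- each "Z" a nonempty stack, each move a second int token and a path over existing rows.  This is
-- exactly where A returns (A raises everywhere else), except that Pre_ also excludes n ≤ 0 with
-- cursor-moving commands, which A survives only via the accidental {0,-1} stub entries its init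
-- loop leaves in the empty linked list (B returns the same empty string there, see claim cites).
def Pre_solution (n : Int) (k : Int) (cmd : List String) : Prop :=
  (cmd.foldl (simStep n) (some ([], some k))).isSome = true
instance (n : Int) (k : Int) (cmd : List String) : Decidable (Pre_solution n k cmd) := by
  unfold Pre_solution; infer_instance

def pvWitness_solution : Int × Int × List String := (1, 0, [])

def Spec_solution (n : Int) (k : Int) (cmd : List String) (out : String) : Prop := out = solution_alt n k cmd
instance (n : Int) (k : Int) (cmd : List String) (out : String) : Decidable (Spec_solution n k cmd out) := by unfold Spec_solution; infer_instance

-- ===== CLAIM (what is proved, stated in full; the proofs are below) =====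
def Claim_equal_solution : Prop := ∀ (n : Int) (k : Int) (cmd : List String), Dom_solution n k cmd → Pre_solution n k cmd → Spec_solution n k cmd (solution n k cmd)

-- ===== LEMMAS AND PROOFS =====
theorem nxtS_eq_some_iff (n : Int) (D : List Int) (s m : Int) :
    nxtS n D s = some m ↔ s ≤ m ∧ m < n ∧ m ∉ D ∧ ∀ t, s ≤ t → t < m → t ∈ D := by
  fun_induction nxtS n D s with
  | case1 j hj hmem ih =>
    rw [ih]
    constructor
    · rintro ⟨h1, h2, h3, h4⟩
      refine ⟨by omega, h2, h3, fun t ht1 ht2 => ?_⟩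
      rcases eq_or_lt_of_le ht1 with h | h
      · exact h ▸ hmem
      · exact h4 t (by omega) ht2
    · rintro ⟨h1, h2, h3, h4⟩
      have hjm : j ≠ m := fun h => h3 (h ▸ hmem)
      exact ⟨by omega, h2, h3, fun t ht1 ht2 => h4 t (by omega) ht2⟩
  | case2 j hj hmem =>
    simp only [Option.some.injEq]
    constructor
    · rintro rfl; exact ⟨le_refl _, hj, hmem, fun t h1 h2 => absurd h1 (by omega)⟩
    · rintro ⟨h1, h2, h3, h4⟩
      rcases eq_or_lt_of_le h1 with h | h
      · exact h
      · exact absurd (h4 j (le_refl _) h) hmem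
  | case3 j hj =>
    simp only [(by simp : (none : Option Int) = some m ↔ False), false_iff]
    rintro ⟨h1, h2, _, _⟩; omega

theorem nxtS_eq_none_iff (n : Int) (D : List Int) (s : Int) :
    nxtS n D s = none ↔ ∀ t, s ≤ t → t < n → t ∈ D := by
  fun_induction nxtS n D s with
  | case1 j hj hmem ih =>
    rw [ih]
    constructor
    · intro h t ht1 ht2
      rcases eq_or_lt_of_le ht1 with h' | h'
      · exact h' ▸ hmem
      · exact h t (by omega) ht2
    · intro h t ht1 ht2; exact h t (by omega) ht2
  | case2 j hj hmem =>
    simp only [(by simp : (some j : Option Int) = none ↔ False), false_iff]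
    intro h; exact hmem (h j (le_refl _) hj)
  | case3 j hj =>
    simp only [true_iff]
    intro t h1 h2; omega

theorem prvS_eq_some_iff (D : List Int) (s q : Int) :
    prvS D s = some q ↔ q ≤ s ∧ 0 ≤ q ∧ q ∉ D ∧ ∀ t, q < t → t ≤ s → t ∈ D := by
  fun_induction prvS D s with
  | case1 j hj hmem ih =>
    rw [ih]
    constructor
    · rintro ⟨h1, h2, h3, h4⟩
      refine ⟨by omega, h2, h3, fun t ht1 ht2 => ?_⟩
      rcases eq_or_lt_of_le ht2 with h | h
      · exact h ▸ hmem
      · exact h4 t ht1 (by omega)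
    · rintro ⟨h1, h2, h3, h4⟩
      have hjq : j ≠ q := fun h => h3 (h ▸ hmem)
      exact ⟨by omega, h2, h3, fun t ht1 ht2 => h4 t ht1 (by omega)⟩
  | case2 j hj hmem =>
    simp only [Option.some.injEq]
    constructor
    · rintro rfl; exact ⟨le_refl _, hj, hmem, fun t h1 h2 => absurd h1 (by omega)⟩
    · rintro ⟨h1, h2, h3, h4⟩
      rcases eq_or_lt_of_le h1 with h | h
      · exact h.symm
      · exact absurd (h4 j h (le_refl _)) hmem
  | case3 j hj =>
    simp only [(by simp : (none : Option Int) = some q ↔ False), false_iff]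
    rintro ⟨h1, h2, _, _⟩; omega

theorem prvS_eq_none_iff (D : List Int) (s : Int) :
    prvS D s = none ↔ ∀ t, 0 ≤ t → t ≤ s → t ∈ D := by
  fun_induction prvS D s with
  | case1 j hj hmem ih =>
    rw [ih]
    constructor
    · intro h t ht1 ht2
      rcases eq_or_lt_of_le ht2 with h' | h'
      · exact h' ▸ hmem
      · exact h t ht1 (by omega)
    · intro h t ht1 ht2; exact h t ht1 (by omega)
  | case2 j hj hmem =>
    simp only [(by simp : (some j : Option Int) = none ↔ False), false_iff]
    intro h; exact hmem (h j hj (le_refl _))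
  | case3 j hj =>
    simp only [true_iff]
    intro t h1 h2; omega

theorem nxtS_congr (n : Int) (D D' : List Int) (s : Int)
    (h : ∀ t, s ≤ t → t < n → (t ∈ D ↔ t ∈ D')) : nxtS n D s = nxtS n D' s := by
  cases hv : nxtS n D' s with
  | none =>
    rw [nxtS_eq_none_iff] at hv ⊢
    intro t h1 h2; exact (h t h1 h2).mpr (hv t h1 h2)
  | some m =>
    rw [nxtS_eq_some_iff] at hv ⊢
    obtain ⟨h1, h2, h3, h4⟩ := hv
    exact ⟨h1, h2, fun hm => h3 ((h m h1 h2).mp hm), fun t ht1 ht2 => (h t ht1 (by omega)).mpr (h4 t ht1 ht2)⟩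

theorem prvS_congr (D D' : List Int) (s : Int)
    (h : ∀ t, 0 ≤ t → t ≤ s → (t ∈ D ↔ t ∈ D')) : prvS D s = prvS D' s := by
  cases hv : prvS D' s with
  | none =>
    rw [prvS_eq_none_iff] at hv ⊢
    intro t h1 h2; exact (h t h1 h2).mpr (hv t h1 h2)
  | some q =>
    rw [prvS_eq_some_iff] at hv ⊢
    obtain ⟨h1, h2, h3, h4⟩ := hv
    exact ⟨h1, h2, fun hm => h3 ((h q h2 h1).mp hm), fun t ht1 ht2 => (h t (by omega) ht2).mpr (h4 t ht1 ht2)⟩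

theorem mem_app (D : List Int) (j t : Int) : t ∈ D ++ [j] ↔ t ∈ D ∨ t = j := by simp

theorem prvS_append_lt (D : List Int) (j s : Int) (h : s < j) :
    prvS (D ++ [j]) s = prvS D s := by
  refine (prvS_congr _ _ _ ?_).symm
  intro t ht1 ht2
  rw [mem_app]
  constructor
  · exact Or.inl
  · rintro (h' | rfl)
    · exact h'
    · omega

theorem nxtS_append_gt (n : Int) (D : List Int) (j s : Int) (h : j < s) :
    nxtS n (D ++ [j]) s = nxtS n D s := by
  refine (nxtS_congr n _ _ _ ?_).symm
  intro t ht1 ht2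
  rw [mem_app]
  constructor
  · exact Or.inl
  · rintro (h' | rfl)
    · exact h'
    · omega

theorem nxtS_append_jump (n : Int) (D : List Int) (j p : Int)
    (hp : prvS D (j - 1) = some p) : nxtS n (D ++ [j]) (p + 1) = nxtS n D (j + 1) := by
  rw [prvS_eq_some_iff] at hp
  obtain ⟨hp1, hp2, hp3, hp4⟩ := hp
  cases hv : nxtS n D (j + 1) with
  | none =>
    rw [nxtS_eq_none_iff] at hv ⊢
    intro t h1 h2
    rw [mem_app]
    rcases lt_trichotomy t j with h | h | h
    · exact Or.inl (hp4 t (by omega) (by omega))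
    · exact Or.inr h
    · exact Or.inl (hv t (by omega) h2)
  | some x =>
    rw [nxtS_eq_some_iff] at hv ⊢
    obtain ⟨h1, h2, h3, h4⟩ := hv
    refine ⟨by omega, h2, ?_, ?_⟩
    · intro hm
      rw [mem_app] at hm
      rcases hm with hm | rfl
      · exact h3 hm
      · omega
    · intro t ht1 ht2
      rw [mem_app]
      rcases lt_trichotomy t j with h | h | h
      · exact Or.inl (hp4 t (by omega) (by omega))
      · exact Or.inr h
      · exact Or.inl (h4 t (by omega) ht2)

theorem prvS_append_jump (n : Int) (D : List Int) (j x : Int)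
    (hx : nxtS n D (j + 1) = some x) : prvS (D ++ [j]) (x - 1) = prvS D (j - 1) := by
  rw [nxtS_eq_some_iff] at hx
  obtain ⟨hx1, hx2, hx3, hx4⟩ := hx
  cases hv : prvS D (j - 1) with
  | none =>
    rw [prvS_eq_none_iff] at hv ⊢
    intro t h1 h2
    rw [mem_app]
    rcases lt_trichotomy t j with h | h | h
    · exact Or.inl (hv t h1 (by omega))
    · exact Or.inr h
    · exact Or.inl (hx4 t (by omega) (by omega))
  | some q =>
    rw [prvS_eq_some_iff] at hv ⊢
    obtain ⟨h1, h2, h3, h4⟩ := hv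
    refine ⟨by omega, h2, ?_, ?_⟩
    · intro hm
      rw [mem_app] at hm
      rcases hm with hm | rfl
      · exact h3 hm
      · omega
    · intro t ht1 ht2
      rw [mem_app]
      rcases lt_trichotomy t j with h | h | h
      · exact Or.inl (h4 t ht1 (by omega))
      · exact Or.inr h
      · exact Or.inl (hx4 t (by omega) (by omega))

theorem prvS_append_other (n : Int) (D : List Int) (j i : Int)
    (hiD : i ∉ D) (hin : i < n) (hx : nxtS n D (j + 1) ≠ some i) :
    prvS (D ++ [j]) (i - 1) = prvS D (i - 1) := by
  cases hv : prvS D (i - 1) with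
  | none =>
    rw [prvS_eq_none_iff] at hv ⊢
    intro t h1 h2
    rw [mem_app]
    exact Or.inl (hv t h1 h2)
  | some q =>
    rw [prvS_eq_some_iff] at hv ⊢
    obtain ⟨h1, h2, h3, h4⟩ := hv
    have hqj : q ≠ j := by
      rintro rfl
      apply hx
      rw [nxtS_eq_some_iff]
      exact ⟨by omega, hin, hiD, fun t ht1 ht2 => h4 t (by omega) (by omega)⟩
    refine ⟨h1, h2, ?_, fun t ht1 ht2 => by rw [mem_app]; exact Or.inl (h4 t ht1 ht2)⟩
    intro hm
    rw [mem_app] at hm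
    rcases hm with hm | rfl
    · exact h3 hm
    · exact hqj rfl

theorem nxtS_append_other (n : Int) (D : List Int) (j i : Int)
    (hiD : i ∉ D) (hi0 : 0 ≤ i) (hp : prvS D (j - 1) ≠ some i) :
    nxtS n (D ++ [j]) (i + 1) = nxtS n D (i + 1) := by
  cases hv : nxtS n D (i + 1) with
  | none =>
    rw [nxtS_eq_none_iff] at hv ⊢
    intro t h1 h2
    rw [mem_app]
    exact Or.inl (hv t h1 h2)
  | some m =>
    rw [nxtS_eq_some_iff] at hv ⊢
    obtain ⟨h1, h2, h3, h4⟩ := hv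
    have hmj : m ≠ j := by
      rintro rfl
      apply hp
      rw [prvS_eq_some_iff]
      exact ⟨by omega, hi0, hiD, fun t ht1 ht2 => h4 t (by omega) (by omega)⟩
    refine ⟨h1, h2, ?_, fun t ht1 ht2 => by rw [mem_app]; exact Or.inl (h4 t ht1 ht2)⟩
    intro hm
    rw [mem_app] at hm
    rcases hm with hm | rfl
    · exact h3 hm
    · exact hmj rfl

theorem upScan_eq (ans : List String) (n : Int) (D : List Int)
    (hst : ∀ i : Int, 0 ≤ i → i < n → PySem.List.pyGet? ans i = some (if i ∈ D then "X" else "O"))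
    (s : Int) (h0 : 0 ≤ s) (hs : s ≤ n) : upScan ans n s = (nxtS n D s).getD n := by
  revert h0 hs
  fun_induction upScan ans n s with
  | case1 j hcond ih =>
    intro h0 hs
    obtain ⟨hjn, hX⟩ := hcond
    have hjD : j ∈ D := by
      by_contra hnd
      rw [hst j h0 hjn, if_neg hnd] at hX
      simp at hX
    rw [show nxtS n D j = nxtS n D (j + 1) by rw [nxtS]; simp [hjn, hjD]]
    exact ih (by omega) (by omega)
  | case2 j hcond =>
    intro h0 hs
    by_cases hjn : j < n
    · have hX : ¬ PySem.List.pyGet? ans j = some "X" := fun h => hcond ⟨hjn, h⟩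
      have hjD : j ∉ D := by
        intro hd
        rw [hst j h0 hjn, if_pos hd] at hX
        exact hX rfl
      rw [show nxtS n D j = some j by rw [nxtS]; simp [hjn, hjD]]
      rfl
    · rw [show nxtS n D j = none by rw [nxtS]; simp [hjn]]
      simp; omega

theorem downScan_eq (ans : List String) (n : Int) (D : List Int)
    (hst : ∀ i : Int, 0 ≤ i → i < n → PySem.List.pyGet? ans i = some (if i ∈ D then "X" else "O"))
    (s : Int) (h0 : -1 ≤ s) (hs : s < n) : downScan ans s = (prvS D s).getD (-1) := by
  revert h0 hs
  fun_induction downScan ans s with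
  | case1 j hcond ih =>
    intro h0 hs
    obtain ⟨hj0, hX⟩ := hcond
    have hjD : j ∈ D := by
      by_contra hnd
      rw [hst j hj0 hs, if_neg hnd] at hX
      simp at hX
    rw [show prvS D j = prvS D (j - 1) by rw [prvS]; simp [hj0, hjD]]
    exact ih (by omega) (by omega)
  | case2 j hcond =>
    intro h0 hs
    by_cases hj0 : 0 ≤ j
    · have hX : ¬ PySem.List.pyGet? ans j = some "X" := fun h => hcond ⟨hj0, h⟩
      have hjD : j ∉ D := by
        intro hd
        rw [hst j hj0 hs, if_pos hd] at hX
        exact hX rfl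
      rw [show prvS D j = some j by rw [prvS]; simp [hj0, hjD]]
      rfl
    · rw [show prvS D j = none by rw [prvS]; simp [hj0]]
      simp; omega

theorem fold_ins (m : Nat) (n : Int) :
    ∀ (a : Int) (d : PySem.Dict Int (Option Int × Option Int)) (i : Int), (n - a).toNat = m →
    ((PySem.List.pyRange a n 1).foldl
        (fun d i => d.insert i (some (i - 1), some (i + 1))) d).getD i (none, none) =
      if a ≤ i ∧ i < n then (some (i - 1), some (i + 1)) else d.getD i (none, none) := by
  induction m with
  | zero =>
    intro a d i hm
    rw [PySem.List.pyRange_one_eq_nil (by omega)]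
    simp only [List.foldl_nil]
    rw [if_neg (by omega)]
  | succ m ih =>
    intro a d i hm
    rw [PySem.List.pyRange_one_cons (by omega)]
    simp only [List.foldl_cons]
    rw [ih (a + 1) _ i (by omega), PySem.Dict.getD_insert]
    by_cases h1 : a + 1 ≤ i ∧ i < n
    · rw [if_pos h1, if_pos (by omega)]
    · rw [if_neg h1]
      by_cases h2 : i = a
      · subst h2; rw [if_pos rfl, if_pos (by omega)]
      · rw [if_neg h2, if_neg (by omega)]

theorem initLL_getD (n i : Int) (h2 : 2 ≤ n) (h0 : 0 ≤ i) (hn : i < n) :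
    (initLL n).getD i (none, none) = (prvS [] (i - 1), nxtS n [] (i + 1)) := by
  have hprv : prvS ([] : List Int) (i - 1) = if 1 ≤ i then some (i - 1) else none := by
    rw [prvS]
    by_cases h : (0:Int) ≤ i - 1
    · rw [if_pos h, if_neg (by simp), if_pos (by omega)]
    · rw [if_neg h, if_neg (by omega)]
  have hnxt : nxtS n ([] : List Int) (i + 1) = if i + 1 < n then some (i + 1) else none := by
    rw [nxtS]
    by_cases h : i + 1 < n
    · rw [if_pos h, if_neg (by simp), if_pos h]
    · rw [if_neg h, if_neg h]
  unfold initLL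
  rw [PySem.Dict.getD_insert, PySem.Dict.getD_insert,
    fold_ins (n - 0).toNat n 0 _ i rfl]
  by_cases ha : i = n - 1
  · rw [if_pos ha, hprv, hnxt, if_pos (by omega), if_neg (by omega), ha]
    exact congrArg (fun z => (some z, none)) (by omega)
  · rw [if_neg ha]
    by_cases hb : i = 0
    · rw [if_pos hb, hprv, hnxt, if_neg (by omega), if_pos (by omega), hb]
      exact congrArg (fun z => (none, some z)) (by omega)
    · rw [if_neg hb, if_pos (by omega), hprv, hnxt, if_pos (by omega), if_pos (by omega)]

theorem pyGet?_pySetD (xs : List String) (i j : Int) (v : String)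
    (h0i : 0 ≤ i) (h0j : 0 ≤ j) (hj : j.toNat < xs.length) :
    PySem.List.pyGet? (PySem.List.pySetD xs j v) i = if i = j then some v else PySem.List.pyGet? xs i := by
  rw [PySem.List.pySetD_of_nonneg _ _ h0j, PySem.List.pyGet?_of_nonneg _ h0i,
    PySem.List.pyGet?_of_nonneg _ h0i, List.getElem?_set]
  by_cases h : i = j
  · rw [if_pos (by omega : j.toNat = i.toNat), if_pos (by omega), if_pos h]
  · rw [if_neg (by omega : ¬ j.toNat = i.toNat), if_neg h]

theorem foldl_iterate {α β : Type} (f : α → α) (l : List β) (x : α) :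
    l.foldl (fun a _ => f a) x = f^[l.length] x := by
  induction l generalizing x with
  | nil => rfl
  | cons y l ih => simp [ih, Function.iterate_succ_apply]


-- unsplice: after an undo of t, t's recorded neighbours point back at t
theorem nxtS_unsplice (n : Int) (D0 : List Int) (t p : Int) (ht : t ∉ D0) (htn : t < n)
    (hp : prvS (D0 ++ [t]) (t - 1) = some p) : nxtS n D0 (p + 1) = some t := by
  rw [prvS_eq_some_iff] at hp
  obtain ⟨h1, h2, h3, h4⟩ := hp
  rw [nxtS_eq_some_iff]
  refine ⟨by omega, htn, ht, fun u hu1 hu2 => ?_⟩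
  have := h4 u (by omega) (by omega)
  rw [mem_app] at this
  rcases this with h | rfl
  · exact h
  · omega

theorem prvS_unsplice (n : Int) (D0 : List Int) (t x : Int) (ht : t ∉ D0) (ht0 : 0 ≤ t)
    (hx : nxtS n (D0 ++ [t]) (t + 1) = some x) : prvS D0 (x - 1) = some t := by
  rw [nxtS_eq_some_iff] at hx
  obtain ⟨h1, h2, h3, h4⟩ := hx
  rw [prvS_eq_some_iff]
  refine ⟨by omega, ht0, ht, fun u hu1 hu2 => ?_⟩
  have := h4 u (by omega) (by omega)
  rw [mem_app] at this
  rcases this with h | rfl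
  · exact h
  · omega

-- the loop invariant between A's state, B's state and the abstract state (D, ks)
structure SInv (n : Int) (D : List Int) (ks : Option Int) (sa : StA) (sb : StB) : Prop where
  ansEq : sa.ans = sb.ans
  stackA : sa.stack = D
  stackB : sb.stack = D
  len : sa.ans.length = n.toNat
  status : ∀ i : Int, 0 ≤ i → i < n → PySem.List.pyGet? sa.ans i = some (if i ∈ D then "X" else "O")
  nodup : D.Nodup
  bounds : ∀ d ∈ D, 0 ≤ d ∧ d < n
  dne : D ≠ [] → 2 ≤ n
  cursor : ∀ j, ks = some j → sa.k = some j ∧ sb.k = j ∧ j ∉ D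
  llAlive : 2 ≤ n → ∀ i : Int, 0 ≤ i → i < n → i ∉ D →
    sa.ll.getD i (none, none) = (prvS D (i - 1), nxtS n D (i + 1))
  llDel : 2 ≤ n → ∀ (D1 : List Int) (t : Int), D1 ++ [t] <+: D →
    sa.ll.getD t (none, none) = (prvS (D1 ++ [t]) (t - 1), nxtS n (D1 ++ [t]) (t + 1))
  llsmall : n < 2 → sa.ll = initLL n ∧ D = []

theorem init_inv (n k : Int) :
    SInv n [] (some k) ⟨List.replicate n.toNat "O", [], initLL n, some k⟩
      ⟨List.replicate n.toNat "O", [], k⟩ := by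
  refine ⟨rfl, rfl, rfl, List.length_replicate, ?_, List.nodup_nil, by simp, by simp, ?_, ?_, ?_, fun _ => ⟨rfl, rfl⟩⟩
  · intro i h0 hn
    rw [PySem.List.pyGet?_of_nonneg _ h0]
    simp only [List.not_mem_nil, if_false, List.getElem?_replicate]
    rw [if_pos (by omega)]
  · intro j hj
    injection hj with hj
    exact ⟨by rw [hj], by rw [hj], by simp⟩
  · intro h2 i h0 hn _
    exact initLL_getD n i h2 h0 hn
  · intro _ D1 t hpre
    simp at hpre

-- one "U"-move step of A reads the linked list; of B scans down; moveSim takes prvS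
theorem moveU_rel (n : Int) (D : List Int) (ll : PySem.Dict Int (Option Int × Option Int))
    (ans : List String)
    (hst : ∀ i : Int, 0 ≤ i → i < n → PySem.List.pyGet? ans i = some (if i ∈ D then "X" else "O"))
    (hllA : 2 ≤ n → ∀ i : Int, 0 ≤ i → i < n → i ∉ D →
      ll.getD i (none, none) = (prvS D (i - 1), nxtS n D (i + 1)))
    (hsm : n < 2 → ll = initLL n ∧ D = []) :
    ∀ (m : Nat) (ks kA : Option Int) (kB : Int),
      (∀ j, ks = some j → kA = some j ∧ kB = j ∧ j ∉ D) →
      ∀ ks', moveSim n D true ks m = some ks' →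
      ∀ j, ks' = some j →
        ((fun kk => match kk with
          | some k0 => (ll.getD k0 (none, none)).1
          | none => none)^[m] kA = some j
        ∧ (fun kk => downScan ans (kk - 1))^[m] kB = j ∧ j ∉ D) := by
  intro m
  induction m with
  | zero =>
    intro ks kA kB hR ks' hsim j hj
    simp only [moveSim, Option.some.injEq] at hsim
    subst hsim
    simpa using hR j hj
  | succ m ih =>
    intro ks kA kB hR ks' hsim j hj
    match hks : ks with
    | none => simp [moveSim] at hsim
    | some j0 =>
      obtain ⟨hA, hB, hD⟩ := hR j0 rfl
      simp only [moveSim] at hsim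
      split at hsim
      case isTrue hrange =>
        simp only [if_true] at hsim
        rw [Function.iterate_succ_apply, Function.iterate_succ_apply]
        by_cases h2 : 2 ≤ n
        · have hll := hllA h2 j0 hrange.1 hrange.2 hD
          refine ih (prvS D (j0 - 1)) _ _ ?_ ks' hsim j hj
          intro q hq
          rw [prvS_eq_some_iff] at hq
          obtain ⟨hq1, hq2, hq3, hq4⟩ := hq
          refine ⟨?_, ?_, hq3⟩
          · rw [hA]
            simp only [hll]
            rw [prvS_eq_some_iff]
            exact ⟨hq1, hq2, hq3, hq4⟩
          · rw [hB, downScan_eq ans n D hst (j0 - 1) (by omega) (by omega)]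
            rw [show prvS D (j0 - 1) = some q by rw [prvS_eq_some_iff]; exact ⟨hq1, hq2, hq3, hq4⟩]
            rfl
        · obtain ⟨hll, hDnil⟩ := hsm (by omega)
          subst hDnil
          have hj00 : j0 = 0 := by omega
          refine ih (prvS [] (j0 - 1)) _ _ ?_ ks' hsim j hj
          intro q hq
          rw [hj00] at hq
          rw [show prvS ([] : List Int) (0 - 1) = none by rw [prvS]; norm_num] at hq
          exact absurd hq (by simp)
      case isFalse => exact absurd hsim (by simp)

-- one "D"-move step: A reads the second pointer; B scans up
theorem moveD_rel (n : Int) (D : List Int) (ll : PySem.Dict Int (Option Int × Option Int))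
    (ans : List String)
    (hst : ∀ i : Int, 0 ≤ i → i < n → PySem.List.pyGet? ans i = some (if i ∈ D then "X" else "O"))
    (hllA : 2 ≤ n → ∀ i : Int, 0 ≤ i → i < n → i ∉ D →
      ll.getD i (none, none) = (prvS D (i - 1), nxtS n D (i + 1)))
    (hsm : n < 2 → ll = initLL n ∧ D = []) :
    ∀ (m : Nat) (ks kA : Option Int) (kB : Int),
      (∀ j, ks = some j → kA = some j ∧ kB = j ∧ j ∉ D) →
      ∀ ks', moveSim n D false ks m = some ks' →
      ∀ j, ks' = some j →
        ((fun kk => match kk with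
          | some k0 => (ll.getD k0 (none, none)).2
          | none => none)^[m] kA = some j
        ∧ (fun kk => upScan ans n (kk + 1))^[m] kB = j ∧ j ∉ D) := by
  intro m
  induction m with
  | zero =>
    intro ks kA kB hR ks' hsim j hj
    simp only [moveSim, Option.some.injEq] at hsim
    subst hsim
    simpa using hR j hj
  | succ m ih =>
    intro ks kA kB hR ks' hsim j hj
    match hks : ks with
    | none => simp [moveSim] at hsim
    | some j0 =>
      obtain ⟨hA, hB, hD⟩ := hR j0 rfl
      simp only [moveSim] at hsim
      split at hsim
      case isTrue hrange =>
        simp only [Bool.false_eq_true, if_false] at hsim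
        rw [Function.iterate_succ_apply, Function.iterate_succ_apply]
        by_cases h2 : 2 ≤ n
        · have hll := hllA h2 j0 hrange.1 hrange.2 hD
          refine ih (nxtS n D (j0 + 1)) _ _ ?_ ks' hsim j hj
          intro q hq
          rw [nxtS_eq_some_iff] at hq
          obtain ⟨hq1, hq2, hq3, hq4⟩ := hq
          refine ⟨?_, ?_, hq3⟩
          · rw [hA]
            simp only [hll]
            rw [nxtS_eq_some_iff]
            exact ⟨hq1, hq2, hq3, hq4⟩
          · rw [hB, upScan_eq ans n D hst (j0 + 1) (by omega) (by omega)]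
            rw [show nxtS n D (j0 + 1) = some q by rw [nxtS_eq_some_iff]; exact ⟨hq1, hq2, hq3, hq4⟩]
            rfl
        · obtain ⟨hll, hDnil⟩ := hsm (by omega)
          subst hDnil
          have hn1 : n = 1 := by omega
          have hj00 : j0 = 0 := by omega
          refine ih (nxtS n [] (j0 + 1)) _ _ ?_ ks' hsim j hj
          intro q hq
          rw [hj00, hn1] at hq
          rw [show nxtS 1 ([] : List Int) (0 + 1) = none by rw [nxtS]; norm_num] at hq
          exact absurd hq (by simp)
      case isFalse => exact absurd hsim (by simp)

theorem stepC_inv (n : Int) (D : List Int) (j : Int) (sa : StA) (sb : StB)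
    (hI : SInv n D (some j) sa sb) (h2n : 2 ≤ n) (hj0 : 0 ≤ j) (hjn : j < n) (hjD : j ∉ D) :
    SInv n (D ++ [j]) ((nxtS n (D ++ [j]) (j + 1)).orElse (fun _ => prvS (D ++ [j]) (j - 1)))
      (stepA sa "C") (stepB n sb "C") := by
  obtain ⟨hkA, hkB, -⟩ := hI.cursor j rfl
  have hlen := hI.len
  have hjtn : j.toNat < sa.ans.length := by omega
  have hpn : sa.ll.getD j (none, none) = (prvS D (j - 1), nxtS n D (j + 1)) :=
    hI.llAlive h2n j hj0 hjn hjD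
  have hstat' : ∀ i : Int, 0 ≤ i → i < n →
      PySem.List.pyGet? (PySem.List.pySetD sa.ans j "X") i =
        some (if i ∈ D ++ [j] then "X" else "O") := by
    intro i h0 hn
    rw [pyGet?_pySetD sa.ans i j "X" h0 hj0 hjtn]
    by_cases hij : i = j
    · rw [if_pos hij, if_pos (by rw [mem_app]; exact Or.inr hij)]
    · rw [if_neg hij, hI.status i h0 hn]
      by_cases hiD : i ∈ D
      · rw [if_pos hiD, if_pos (by rw [mem_app]; exact Or.inl hiD)]
      · rw [if_neg hiD, if_neg (by rw [mem_app]; rintro (h | h); exacts [hiD h, hij h])]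
  have hlen' : (PySem.List.pySetD sa.ans j "X").length = n.toNat := by
    rw [PySem.List.length_pySetD]; exact hlen
  have hnx' : nxtS n (D ++ [j]) (j + 1) = nxtS n D (j + 1) := nxtS_append_gt n D j (j + 1) (by omega)
  have hpv' : prvS (D ++ [j]) (j - 1) = prvS D (j - 1) := prvS_append_lt D j (j - 1) (by omega)
  have hnodup' : (D ++ [j]).Nodup := by
    rw [← List.concat_eq_append]
    exact hI.nodup.concat hjD
  have hbounds' : ∀ d ∈ D ++ [j], 0 ≤ d ∧ d < n := by
    intro d hd
    rw [mem_app] at hd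
    rcases hd with hd | rfl
    · exact hI.bounds d hd
    · exact ⟨hj0, hjn⟩
  have hup : upScan (PySem.List.pySetD sa.ans j "X") n (j + 1) =
      (nxtS n D (j + 1)).getD n := by
    rw [upScan_eq _ n (D ++ [j]) hstat' (j + 1) (by omega) (by omega), hnx']
  have hdown : downScan (PySem.List.pySetD sa.ans j "X") (j - 1) =
      (prvS D (j - 1)).getD (-1) := by
    rw [downScan_eq _ n (D ++ [j]) hstat' (j - 1) (by omega) (by omega), hpv']
  simp only [stepA, stepB, show PySem.Str.split₀ "C" = ["C"] by decide, if_true]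
  simp only [hkA, hkB, ← hI.ansEq]
  rw [hI.stackA, hI.stackB]
  simp only [hpn]
  cases hX : nxtS n D (j + 1) with
  | some x =>
    have hxc := (nxtS_eq_some_iff n D (j + 1) x).mp hX
    obtain ⟨hx1, hx2, hx3, hx4⟩ := hxc
    have hxj : x ≠ j := by omega
    have hxD' : x ∉ D ++ [j] := by rw [mem_app]; rintro (h | h); exacts [hx3 h, hxj h]
    have hupx : upScan (PySem.List.pySetD sa.ans j "X") n (j + 1) = x := by rw [hup, hX]; rfl
    have hcursor : ∀ q, ((nxtS n (D ++ [j]) (j + 1)).orElse (fun _ => prvS (D ++ [j]) (j - 1))) = some q →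
        some x = some q ∧ (if upScan (PySem.List.pySetD sa.ans j "X") n (j + 1) < n then
          upScan (PySem.List.pySetD sa.ans j "X") n (j + 1) else
          downScan (PySem.List.pySetD sa.ans j "X") (j - 1)) = q ∧ q ∉ D ++ [j] := by
      intro q hq
      rw [hnx', hX] at hq
      simp only [Option.orElse] at hq
      injection hq with hq
      subst hq
      exact ⟨rfl, by rw [hupx, if_pos hx2], hxD'⟩
    cases hP : prvS D (j - 1) with
    | some p =>
      have hpc := (prvS_eq_some_iff D (j - 1) p).mp hP
      obtain ⟨hp1, hp2, hp3, hp4⟩ := hpc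
      have hpj : p ≠ j := by omega
      have hpx : p ≠ x := by omega
      refine ⟨rfl, rfl, rfl, hlen', hstat', hnodup', hbounds', fun _ => h2n, hcursor, ?_, ?_, by omega⟩
      · -- llAlive
        intro _ i h0 hin hiD'
        have hiD : i ∉ D := fun h => hiD' (by rw [mem_app]; exact Or.inl h)
        have hij : i ≠ j := fun h => hiD' (by rw [mem_app]; exact Or.inr h)
        rw [PySem.Dict.getD_modify]
        by_cases hix : i = x
        · subst hix
          rw [if_pos rfl, PySem.Dict.getD_modify, if_neg (fun h => hpx h.symm),
            hI.llAlive h2n i (by omega) hx2 hx3,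
            (prvS_append_jump n D j i hX).trans hP, nxtS_append_gt n D j (i + 1) (by omega)]
        · rw [if_neg hix, PySem.Dict.getD_modify]
          by_cases hip : i = p
          · subst hip
            rw [if_pos rfl, hI.llAlive h2n i hp2 (by omega) hp3,
              (nxtS_append_jump n D j i hP).trans hX, prvS_append_lt D j (i - 1) (by omega)]
          · rw [if_neg hip, hI.llAlive h2n i h0 hin hiD,
              prvS_append_other n D j i hiD hin (by rw [hX]; intro h; injection h with h; exact hix h.symm),
              nxtS_append_other n D j i hiD h0 (by rw [hP]; intro h; injection h with h; exact hip h.symm)]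
      · -- llDel
        intro _ D1 t hpre
        rw [List.prefix_concat_iff, or_comm] at hpre
        rcases hpre with hpre | hpre
        · have htD : t ∈ D := hpre.sublist.subset (by simp)
          have htp : t ≠ p := fun h => hp3 (h ▸ htD)
          have htx : t ≠ x := fun h => hx3 (h ▸ htD)
          rw [PySem.Dict.getD_modify, if_neg htx, PySem.Dict.getD_modify, if_neg htp]
          exact hI.llDel h2n D1 t hpre
        · obtain ⟨hD1, ht⟩ : D1 = D ∧ t = j := by
            have := List.append_inj' hpre rfl
            exact ⟨this.1, by simpa using this.2⟩
          subst hD1 ht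
          rw [PySem.Dict.getD_modify, if_neg (fun h => hxj h.symm),
            PySem.Dict.getD_modify, if_neg (fun h => hpj h.symm), hpn, hpv', hnx', hP, hX]
    | none =>
      refine ⟨rfl, rfl, rfl, hlen', hstat', hnodup', hbounds', fun _ => h2n, hcursor, ?_, ?_, by omega⟩
      · -- llAlive
        intro _ i h0 hin hiD'
        have hiD : i ∉ D := fun h => hiD' (by rw [mem_app]; exact Or.inl h)
        have hij : i ≠ j := fun h => hiD' (by rw [mem_app]; exact Or.inr h)
        rw [PySem.Dict.getD_modify]
        by_cases hix : i = x
        · subst hix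
          rw [if_pos rfl, hI.llAlive h2n i (by omega) hx2 hx3,
            (prvS_append_jump n D j i hX).trans hP, nxtS_append_gt n D j (i + 1) (by omega)]
        · rw [if_neg hix, hI.llAlive h2n i h0 hin hiD,
            prvS_append_other n D j i hiD hin (by rw [hX]; intro h; injection h with h; exact hix h.symm),
            nxtS_append_other n D j i hiD h0 (by rw [hP]; exact fun h => by injection h)]
      · -- llDel
        intro _ D1 t hpre
        rw [List.prefix_concat_iff, or_comm] at hpre
        rcases hpre with hpre | hpre
        · have htD : t ∈ D := hpre.sublist.subset (by simp)
          have htx : t ≠ x := fun h => hx3 (h ▸ htD)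
          rw [PySem.Dict.getD_modify, if_neg htx]
          exact hI.llDel h2n D1 t hpre
        · obtain ⟨hD1, ht⟩ : D1 = D ∧ t = j := by
            have := List.append_inj' hpre rfl
            exact ⟨this.1, by simpa using this.2⟩
          subst hD1 ht
          rw [PySem.Dict.getD_modify, if_neg (fun h => hxj h.symm), hpn, hpv', hnx', hX, hP]
  | none =>
    have hupn : upScan (PySem.List.pySetD sa.ans j "X") n (j + 1) = n := by rw [hup, hX]; rfl
    cases hP : prvS D (j - 1) with
    | some p =>
      have hpc := (prvS_eq_some_iff D (j - 1) p).mp hP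
      obtain ⟨hp1, hp2, hp3, hp4⟩ := hpc
      have hpj : p ≠ j := by omega
      have hpD' : p ∉ D ++ [j] := by rw [mem_app]; rintro (h | h); exacts [hp3 h, hpj h]
      refine ⟨rfl, rfl, rfl, hlen', hstat', hnodup', hbounds', fun _ => h2n, ?_, ?_, ?_, by omega⟩
      · -- cursor
        intro q hq
        rw [hnx', hX, hpv', hP] at hq
        simp only [Option.orElse] at hq
        injection hq with hq
        subst hq
        refine ⟨rfl, ?_, hpD'⟩
        rw [hupn, if_neg (by omega), hdown, hP]
        rfl
      · -- llAlive
        intro _ i h0 hin hiD'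
        have hiD : i ∉ D := fun h => hiD' (by rw [mem_app]; exact Or.inl h)
        have hij : i ≠ j := fun h => hiD' (by rw [mem_app]; exact Or.inr h)
        rw [PySem.Dict.getD_modify]
        by_cases hip : i = p
        · subst hip
          rw [if_pos rfl, hI.llAlive h2n i hp2 (by omega) hp3,
            (nxtS_append_jump n D j i hP).trans hX, prvS_append_lt D j (i - 1) (by omega)]
        · rw [if_neg hip, hI.llAlive h2n i h0 hin hiD,
            prvS_append_other n D j i hiD hin (by rw [hX]; exact fun h => by injection h),
            nxtS_append_other n D j i hiD h0 (by rw [hP]; intro h; injection h with h; exact hip h.symm)]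
      · -- llDel
        intro _ D1 t hpre
        rw [List.prefix_concat_iff, or_comm] at hpre
        rcases hpre with hpre | hpre
        · have htD : t ∈ D := hpre.sublist.subset (by simp)
          have htp : t ≠ p := fun h => hp3 (h ▸ htD)
          rw [PySem.Dict.getD_modify, if_neg htp]
          exact hI.llDel h2n D1 t hpre
        · obtain ⟨hD1, ht⟩ : D1 = D ∧ t = j := by
            have := List.append_inj' hpre rfl
            exact ⟨this.1, by simpa using this.2⟩
          subst hD1 ht
          rw [PySem.Dict.getD_modify, if_neg (fun h => hpj h.symm), hpn, hpv', hnx', hX, hP]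
    | none =>
      refine ⟨rfl, rfl, rfl, hlen', hstat', hnodup', hbounds', fun _ => h2n, ?_, ?_, ?_, by omega⟩
      · -- cursor
        intro q hq
        rw [hnx', hX, hpv', hP] at hq
        simp only [Option.orElse] at hq
        exact absurd hq (by simp)
      · -- llAlive
        intro _ i h0 hin hiD'
        have hiD : i ∉ D := fun h => hiD' (by rw [mem_app]; exact Or.inl h)
        have hij : i ≠ j := fun h => hiD' (by rw [mem_app]; exact Or.inr h)
        rw [hI.llAlive h2n i h0 hin hiD,
          prvS_append_other n D j i hiD hin (by rw [hX]; exact fun h => by injection h),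
          nxtS_append_other n D j i hiD h0 (by rw [hP]; exact fun h => by injection h)]
      · -- llDel
        intro _ D1 t hpre
        rw [List.prefix_concat_iff, or_comm] at hpre
        rcases hpre with hpre | hpre
        · exact hI.llDel h2n D1 t hpre
        · obtain ⟨hD1, ht⟩ : D1 = D ∧ t = j := by
            have := List.append_inj' hpre rfl
            exact ⟨this.1, by simpa using this.2⟩
          subst hD1 ht
          rw [hpn, hpv', hnx', hX, hP]

theorem stepZ_inv (n : Int) (D : List Int) (ks : Option Int) (sa : StA) (sb : StB)
    (hI : SInv n D ks sa sb) (hne : D ≠ []) :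
    SInv n D.dropLast ks (stepA sa "Z") (stepB n sb "Z") := by
  have h2n := hI.dne hne
  have hDt : D.dropLast ++ [D.getLast hne] = D := List.dropLast_append_getLast hne
  generalize ht : D.getLast hne = t at hDt
  have hstkA : sa.stack.getLast? = some t := by
    rw [hI.stackA, List.getLast?_eq_some_getLast hne, ht]
  have hstkB : sb.stack.getLast? = some t := by
    rw [hI.stackB, List.getLast?_eq_some_getLast hne, ht]
  have htD : t ∈ D := by rw [← ht]; exact List.getLast_mem hne
  obtain ⟨ht0, htn⟩ := hI.bounds t htD
  have htD0 : t ∉ D.dropLast := by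
    intro hmem
    have hnd := hI.nodup
    rw [← hDt, ← List.concat_eq_append, List.nodup_concat] at hnd
    exact hnd.1 hmem
  have httn : t.toNat < sa.ans.length := by have := hI.len; omega
  have hpn : sa.ll.getD t (none, none) = (prvS D (t - 1), nxtS n D (t + 1)) := by
    have h := hI.llDel h2n D.dropLast t (by rw [hDt])
    rwa [hDt] at h
  have hsubD : ∀ i : Int, i ∈ D.dropLast → i ∈ D := fun i h => (List.dropLast_sublist D).subset h
  have hmemD : ∀ i : Int, i ≠ t → (i ∈ D ↔ i ∈ D.dropLast) := by
    intro i hit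
    constructor
    · intro h
      rw [← hDt, mem_app] at h
      rcases h with h | h
      · exact h
      · exact absurd h hit
    · exact hsubD i
  have hstat' : ∀ i : Int, 0 ≤ i → i < n →
      PySem.List.pyGet? (PySem.List.pySetD sa.ans t "O") i =
        some (if i ∈ D.dropLast then "X" else "O") := by
    intro i h0 hn
    rw [pyGet?_pySetD sa.ans i t "O" h0 ht0 httn]
    by_cases hit : i = t
    · rw [if_pos hit, if_neg (fun h => htD0 (hit ▸ h))]
    · rw [if_neg hit, hI.status i h0 hn]
      by_cases hiD : i ∈ D
      · rw [if_pos hiD, if_pos ((hmemD i hit).mp hiD)]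
      · rw [if_neg hiD, if_neg (fun h => hiD ((hmemD i hit).mpr h))]
  have hprvD0 : prvS D.dropLast (t - 1) = prvS D (t - 1) := by
    rw [← hDt, prvS_append_lt D.dropLast t (t - 1) (by omega), hDt]
  have hnxtD0 : nxtS n D.dropLast (t + 1) = nxtS n D (t + 1) := by
    rw [← hDt, nxtS_append_gt n D.dropLast t (t + 1) (by omega), hDt]
  simp only [stepA, stepB, show PySem.Str.split₀ "Z" = ["Z"] by decide,
    show (("Z" : String) = "C") = False by simp, if_false, if_true, hstkA, hstkB,
    ← hI.ansEq]
  rw [hI.stackA, hI.stackB]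
  simp only [hpn]
  cases hX : nxtS n D (t + 1) with
  | some x =>
    have hxc := (nxtS_eq_some_iff n D (t + 1) x).mp hX
    obtain ⟨hx1, hx2, hx3, hx4⟩ := hxc
    have hxt : x ≠ t := by omega
    have hprvx : prvS D.dropLast (x - 1) = some t :=
      prvS_unsplice n D.dropLast t x htD0 ht0 (by rw [hDt]; exact hX)
    cases hP : prvS D (t - 1) with
    | some p =>
      have hpc := (prvS_eq_some_iff D (t - 1) p).mp hP
      obtain ⟨hp1, hp2, hp3, hp4⟩ := hpc
      have hpt : p ≠ t := by omega
      have hpx : p ≠ x := by omega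
      have hnxtp : nxtS n D.dropLast (p + 1) = some t :=
        nxtS_unsplice n D.dropLast t p htD0 htn (by rw [hDt]; exact hP)
      refine ⟨rfl, rfl, rfl, by rw [PySem.List.length_pySetD]; exact hI.len, hstat',
        hI.nodup.sublist (List.dropLast_sublist D), fun d hd => hI.bounds d (hsubD d hd),
        fun _ => h2n, ?_, ?_, ?_, by omega⟩
      · -- cursor
        intro q hq
        obtain ⟨hA, hB, hD⟩ := hI.cursor q hq
        exact ⟨hA, hB, fun h => hD (hsubD q h)⟩
      · -- llAlive
        intro _ i h0 hin hiD0
        rw [PySem.Dict.getD_modify]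
        by_cases hix : i = x
        · subst hix
          rw [if_pos rfl, PySem.Dict.getD_modify, if_neg (fun h => hpx h.symm),
            hI.llAlive h2n i (by omega) hx2 hx3, hprvx]
          rw [show nxtS n D.dropLast (i + 1) = nxtS n D (i + 1) by
            rw [← hDt, nxtS_append_gt n D.dropLast t (i + 1) (by omega), hDt]]
        · rw [if_neg hix, PySem.Dict.getD_modify]
          by_cases hip : i = p
          · subst hip
            rw [if_pos rfl, hI.llAlive h2n i hp2 (by omega) hp3, hnxtp]
            rw [show prvS D.dropLast (i - 1) = prvS D (i - 1) by
              rw [← hDt, prvS_append_lt D.dropLast t (i - 1) (by omega), hDt]]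
          · by_cases hit : i = t
            · subst hit
              rw [if_neg hip, hI.llDel h2n D.dropLast i (by rw [hDt]), hDt, hprvD0, hnxtD0]
            · have hiD : i ∉ D := fun h => hiD0 ((hmemD i hit).mp h)
              rw [if_neg hip, hI.llAlive h2n i h0 hin hiD]
              rw [show prvS D.dropLast (i - 1) = prvS D (i - 1) from by
                  rw [← hDt, prvS_append_other n D.dropLast t i hiD0 hin
                    (by rw [show nxtS n D.dropLast (t + 1) = some x from hnxtD0.trans hX];
                        intro h; injection h with h; exact hix h.symm), hDt],
                show nxtS n D.dropLast (i + 1) = nxtS n D (i + 1) from by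
                  rw [← hDt, nxtS_append_other n D.dropLast t i hiD0 h0
                    (by rw [show prvS D.dropLast (t - 1) = some p from hprvD0.trans hP];
                        intro h; injection h with h; exact hip h.symm), hDt]]
      · -- llDel
        intro _ D1 u hpre
        have huD0 : u ∈ D.dropLast := hpre.sublist.subset (by simp)
        have hup : u ≠ p := fun h => hp3 (h ▸ hsubD u huD0)
        have hux : u ≠ x := fun h => hx3 (h ▸ hsubD u huD0)
        rw [PySem.Dict.getD_modify, if_neg hux, PySem.Dict.getD_modify, if_neg hup]
        exact hI.llDel h2n D1 u (hpre.trans (List.dropLast_prefix D))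
    | none =>
      refine ⟨rfl, rfl, rfl, by rw [PySem.List.length_pySetD]; exact hI.len, hstat',
        hI.nodup.sublist (List.dropLast_sublist D), fun d hd => hI.bounds d (hsubD d hd),
        fun _ => h2n, ?_, ?_, ?_, by omega⟩
      · intro q hq
        obtain ⟨hA, hB, hD⟩ := hI.cursor q hq
        exact ⟨hA, hB, fun h => hD (hsubD q h)⟩
      · -- llAlive
        intro _ i h0 hin hiD0
        rw [PySem.Dict.getD_modify]
        by_cases hix : i = x
        · subst hix
          rw [if_pos rfl, hI.llAlive h2n i (by omega) hx2 hx3, hprvx]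
          rw [show nxtS n D.dropLast (i + 1) = nxtS n D (i + 1) by
            rw [← hDt, nxtS_append_gt n D.dropLast t (i + 1) (by omega), hDt]]
        · by_cases hit : i = t
          · subst hit
            rw [if_neg hix, hI.llDel h2n D.dropLast i (by rw [hDt]), hDt, hprvD0, hnxtD0]
          · have hiD : i ∉ D := fun h => hiD0 ((hmemD i hit).mp h)
            rw [if_neg hix, hI.llAlive h2n i h0 hin hiD]
            rw [show prvS D.dropLast (i - 1) = prvS D (i - 1) from by
                rw [← hDt, prvS_append_other n D.dropLast t i hiD0 hin
                  (by rw [show nxtS n D.dropLast (t + 1) = some x from hnxtD0.trans hX];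
                      intro h; injection h with h; exact hix h.symm), hDt],
              show nxtS n D.dropLast (i + 1) = nxtS n D (i + 1) from by
                rw [← hDt, nxtS_append_other n D.dropLast t i hiD0 h0
                  (by rw [show prvS D.dropLast (t - 1) = none from hprvD0.trans hP];
                      exact fun h => by injection h), hDt]]
      · -- llDel
        intro _ D1 u hpre
        have huD0 : u ∈ D.dropLast := hpre.sublist.subset (by simp)
        have hux : u ≠ x := fun h => hx3 (h ▸ hsubD u huD0)
        rw [PySem.Dict.getD_modify, if_neg hux]
        exact hI.llDel h2n D1 u (hpre.trans (List.dropLast_prefix D))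
  | none =>
    cases hP : prvS D (t - 1) with
    | some p =>
      have hpc := (prvS_eq_some_iff D (t - 1) p).mp hP
      obtain ⟨hp1, hp2, hp3, hp4⟩ := hpc
      have hpt : p ≠ t := by omega
      have hnxtp : nxtS n D.dropLast (p + 1) = some t :=
        nxtS_unsplice n D.dropLast t p htD0 htn (by rw [hDt]; exact hP)
      refine ⟨rfl, rfl, rfl, by rw [PySem.List.length_pySetD]; exact hI.len, hstat',
        hI.nodup.sublist (List.dropLast_sublist D), fun d hd => hI.bounds d (hsubD d hd),
        fun _ => h2n, ?_, ?_, ?_, by omega⟩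
      · intro q hq
        obtain ⟨hA, hB, hD⟩ := hI.cursor q hq
        exact ⟨hA, hB, fun h => hD (hsubD q h)⟩
      · -- llAlive
        intro _ i h0 hin hiD0
        rw [PySem.Dict.getD_modify]
        by_cases hip : i = p
        · subst hip
          rw [if_pos rfl, hI.llAlive h2n i hp2 (by omega) hp3, hnxtp]
          rw [show prvS D.dropLast (i - 1) = prvS D (i - 1) by
            rw [← hDt, prvS_append_lt D.dropLast t (i - 1) (by omega), hDt]]
        · by_cases hit : i = t
          · subst hit
            rw [if_neg hip, hI.llDel h2n D.dropLast i (by rw [hDt]), hDt, hprvD0, hnxtD0]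
          · have hiD : i ∉ D := fun h => hiD0 ((hmemD i hit).mp h)
            rw [if_neg hip, hI.llAlive h2n i h0 hin hiD]
            rw [show prvS D.dropLast (i - 1) = prvS D (i - 1) from by
                rw [← hDt, prvS_append_other n D.dropLast t i hiD0 hin
                  (by rw [show nxtS n D.dropLast (t + 1) = none from hnxtD0.trans hX];
                      exact fun h => by injection h), hDt],
              show nxtS n D.dropLast (i + 1) = nxtS n D (i + 1) from by
                rw [← hDt, nxtS_append_other n D.dropLast t i hiD0 h0
                  (by rw [show prvS D.dropLast (t - 1) = some p from hprvD0.trans hP];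
                      intro h; injection h with h; exact hip h.symm), hDt]]
      · -- llDel
        intro _ D1 u hpre
        have huD0 : u ∈ D.dropLast := hpre.sublist.subset (by simp)
        have hup : u ≠ p := fun h => hp3 (h ▸ hsubD u huD0)
        rw [PySem.Dict.getD_modify, if_neg hup]
        exact hI.llDel h2n D1 u (hpre.trans (List.dropLast_prefix D))
    | none =>
      refine ⟨rfl, rfl, rfl, by rw [PySem.List.length_pySetD]; exact hI.len, hstat',
        hI.nodup.sublist (List.dropLast_sublist D), fun d hd => hI.bounds d (hsubD d hd),
        fun _ => h2n, ?_, ?_, ?_, by omega⟩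
      · intro q hq
        obtain ⟨hA, hB, hD⟩ := hI.cursor q hq
        exact ⟨hA, hB, fun h => hD (hsubD q h)⟩
      · -- llAlive
        intro _ i h0 hin hiD0
        by_cases hit : i = t
        · subst hit
          rw [hI.llDel h2n D.dropLast i (by rw [hDt]), hDt, hprvD0, hnxtD0]
        · have hiD : i ∉ D := fun h => hiD0 ((hmemD i hit).mp h)
          rw [hI.llAlive h2n i h0 hin hiD]
          rw [show prvS D.dropLast (i - 1) = prvS D (i - 1) from by
              rw [← hDt, prvS_append_other n D.dropLast t i hiD0 hin
                (by rw [show nxtS n D.dropLast (t + 1) = none from hnxtD0.trans hX];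
                    exact fun h => by injection h), hDt],
            show nxtS n D.dropLast (i + 1) = nxtS n D (i + 1) from by
              rw [← hDt, nxtS_append_other n D.dropLast t i hiD0 h0
                (by rw [show prvS D.dropLast (t - 1) = none from hprvD0.trans hP];
                    exact fun h => by injection h), hDt]]
      · -- llDel
        intro _ D1 u hpre
        exact hI.llDel h2n D1 u (hpre.trans (List.dropLast_prefix D))

theorem step_inv (n : Int) (D : List Int) (ks : Option Int) (st' : List Int × Option Int)
    (sa : StA) (sb : StB) (c : String)
    (hs : simStep n (some (D, ks)) c = some st') (hI : SInv n D ks sa sb) :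
    SInv n st'.1 st'.2 (stepA sa c) (stepB n sb c) := by
  obtain ⟨D', ks'⟩ := st'
  unfold simStep at hs
  cases hsp : PySem.Str.split₀ c with
  | nil => rw [hsp] at hs; exact absurd hs (by simp)
  | cons c0 rest =>
    rw [hsp] at hs
    dsimp only [] at hs
    by_cases hc : c0 = "C"
    · -- delete
      rw [if_pos hc] at hs
      cases hk : ks with
      | none => rw [hk] at hs; exact absurd hs (by simp)
      | some j =>
        rw [hk] at hs
        dsimp only [] at hs
        split_ifs at hs with hcond
        obtain ⟨h2n, hj0, hjn, hjD⟩ := hcond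
        rw [Option.some.injEq, Prod.mk.injEq] at hs
        obtain ⟨hD', hks'⟩ := hs
        subst hD' hks' hk
        have hCA : stepA sa c = stepA sa "C" := by
          unfold stepA
          rw [hsp, hc]
          cases h : PySem.Str.split₀ "C" with
          | nil => exact absurd h (by decide)
          | cons d0 drest =>
            have : d0 = "C" := by
              have : PySem.Str.split₀ "C" = ["C"] := by decide
              rw [this] at h; injection h with h1 _; exact h1.symm
            rw [this]
            rfl
        have hCB : stepB n sb c = stepB n sb "C" := by
          unfold stepB
          rw [hsp, hc]
          cases h : PySem.Str.split₀ "C" with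
          | nil => exact absurd h (by decide)
          | cons d0 drest =>
            have : d0 = "C" := by
              have : PySem.Str.split₀ "C" = ["C"] := by decide
              rw [this] at h; injection h with h1 _; exact h1.symm
            rw [this]
            rfl
        rw [hCA, hCB]
        exact stepC_inv n D j sa sb hI h2n hj0 hjn hjD
    · rw [if_neg hc] at hs
      by_cases hz : c0 = "Z"
      · -- undo
        rw [if_pos hz] at hs
        split_ifs at hs with hDne
        rw [Option.some.injEq, Prod.mk.injEq] at hs
        obtain ⟨hD', hks'⟩ := hs
        subst hD' hks'
        have hZA : stepA sa c = stepA sa "Z" := by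
          unfold stepA
          rw [hsp, hz, show PySem.Str.split₀ "Z" = ["Z"] by decide]
          rfl
        have hZB : stepB n sb c = stepB n sb "Z" := by
          unfold stepB
          rw [hsp, hz, show PySem.Str.split₀ "Z" = ["Z"] by decide]
          rfl
        rw [hZA, hZB]
        exact stepZ_inv n D ks sa sb hI hDne
      · -- move
        rw [if_neg hz] at hs
        cases rest with
        | nil => exact absurd hs (by simp)
        | cons c1 rest2 =>
          dsimp only [] at hs
          cases hof : PySem.Int.ofStr? c1 with
          | none => rw [hof] at hs; exact absurd hs (by simp)
          | some amt =>
            rw [hof] at hs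
            simp only [Option.map_eq_some_iff] at hs
            obtain ⟨ksv, hmv, hpair⟩ := hs
            rw [Prod.mk.injEq] at hpair
            obtain ⟨hD', hks'⟩ := hpair
            subst hD' hks'
            by_cases hU : c0 = "U"
            · have hcU : (c0 = "U") = True := by simp [hU]
              simp only [stepA, stepB, hsp, hof, if_neg hc, if_neg hz, hcU, if_true]
              refine ⟨hI.ansEq, hI.stackA, hI.stackB, hI.len, hI.status, hI.nodup, hI.bounds,
                hI.dne, ?_, hI.llAlive, hI.llDel, hI.llsmall⟩
              intro q hq
              have hmv' : moveSim n D true ks amt.toNat = some ksv := by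
                rw [show (c0 == "U") = true by simp [hU]] at hmv; exact hmv
              have hres := moveU_rel n D sa.ll sb.ans
                (by rw [← hI.ansEq]; exact hI.status) hI.llAlive hI.llsmall amt.toNat ks sa.k sb.k
                (fun j hj => (hI.cursor j hj)) ksv hmv' q hq
              rw [foldl_iterate, foldl_iterate, List.length_range]
              exact hres
            · have hcU : (c0 = "U") = False := by simp [hU]
              simp only [stepA, stepB, hsp, hof, if_neg hc, if_neg hz, hcU, if_false]
              refine ⟨hI.ansEq, hI.stackA, hI.stackB, hI.len, hI.status, hI.nodup, hI.bounds,
                hI.dne, ?_, hI.llAlive, hI.llDel, hI.llsmall⟩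
              intro q hq
              have hmv' : moveSim n D false ks amt.toNat = some ksv := by
                rw [show (c0 == "U") = false by simp [hU]] at hmv; exact hmv
              have hres := moveD_rel n D sa.ll sb.ans
                (by rw [← hI.ansEq]; exact hI.status) hI.llAlive hI.llsmall amt.toNat ks sa.k sb.k
                (fun j hj => (hI.cursor j hj)) ksv hmv' q hq
              rw [foldl_iterate, foldl_iterate, List.length_range]
              exact hres

theorem fold_none (n : Int) (cmds : List String) :
    cmds.foldl (simStep n) none = none := by
  induction cmds with
  | nil => rfl
  | cons c cs ih => simpa [simStep] using ih

theorem fold_ans (n : Int) :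
    ∀ (cmds : List String) (D : List Int) (ks : Option Int) (sa : StA) (sb : StB),
      SInv n D ks sa sb → (cmds.foldl (simStep n) (some (D, ks))).isSome = true →
      (cmds.foldl stepA sa).ans = (cmds.foldl (stepB n) sb).ans := by
  intro cmds
  induction cmds with
  | nil => intro D ks sa sb hI _; exact hI.ansEq
  | cons c cs ih =>
    intro D ks sa sb hI hfold
    simp only [List.foldl_cons] at hfold ⊢
    cases hstep : simStep n (some (D, ks)) c with
    | none =>
      rw [hstep, fold_none] at hfold
      exact absurd hfold (by simp)
    | some st' =>
      rw [hstep] at hfold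
      exact ih st'.1 st'.2 _ _ (step_inv n D ks st' sa sb c hstep hI) hfold

-- ===== VERDICT (by name: the statement is the Claim_ definition above) =====
theorem solution_spec : Claim_equal_solution := by
  intro n k cmd _ hpre
  unfold Spec_solution solution solution_alt
  rw [fold_ans n cmd [] (some k) _ _ (init_inv n k) hpre]
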